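-- pv_equiv track=rewrite | github.com/UlissePalmi/Quant_Project | src/risk_factor_pred/core/htmlCleaner.py | merge_I_tem
-- ===== SOURCE A (Python) =====
-- def merge_I_tem(content: str) -> str: # Finds lines with 'I' & next line starts with 'tem' then merge them
--     lines = content.splitlines()  # split into lines without keeping '\n'
--     new_lines = []
--     i = 0
--
--     while i < len(lines):
--         # Make sure there *is* a next line to look at
--         if (
--             lines[i].strip() == "I" and
--             i + 1 < len(lines) and
--             lines[i + 1].lstrip().startswith("tem")
--         ):
--             merged_line = "I" + lines[i + 1].lstrip()  # e.g. "Item 1. ..."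
--             new_lines.append(merged_line)
--             i += 2  # skip the next line because we've merged it
--         else:
--             new_lines.append(lines[i])
--             i += 1
--     return "\n".join(new_lines)
-- ===== SOURCE B (Python) =====
-- def merge_I_tem(content: str) -> str:
--     out = []
--     for line in content.splitlines():
--         ls = line.lstrip()
--         if ls.startswith("tem") and out and out[-1].strip() == "I":
--             out[-1] = "I" + ls
--         else:
--             out.append(line)
--     return "\n".join(out)
-- ===== Notes on version B (the rewrite author's own statement) =====
-- stated objective: alternative
-- what changed: Replaced A's index-based while loop that looks AHEAD (peeks the next line and skips it by i += 2) with a single fold that looks BEHIND: every line is appended to the output, and a line that begins a merge overwrites the last accumulated output entry with the merged line.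
import Mathlib
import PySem

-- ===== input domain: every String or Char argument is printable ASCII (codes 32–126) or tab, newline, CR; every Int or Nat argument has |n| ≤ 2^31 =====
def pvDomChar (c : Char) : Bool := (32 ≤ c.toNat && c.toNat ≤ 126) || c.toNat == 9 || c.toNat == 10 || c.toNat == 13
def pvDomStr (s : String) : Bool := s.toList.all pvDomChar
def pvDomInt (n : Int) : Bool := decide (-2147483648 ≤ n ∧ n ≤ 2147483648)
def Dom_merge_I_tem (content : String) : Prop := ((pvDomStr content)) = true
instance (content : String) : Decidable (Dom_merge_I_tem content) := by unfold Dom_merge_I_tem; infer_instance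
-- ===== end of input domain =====

-- B merges by one forward fold that looks behind and overwrites the last output line
-- (instead of A's index loop that peeks at the next line and skips it); objective: alternative decomposition, same cost.

-- ===== PORT A =====
-- A's while loop over the line index, with the merge skipping the next line (i += 2),
-- as the obvious structural recursion on the remaining lines (List Char per line; exact on ASCII).
def goA : List (List Char) → List (List Char)
  | [] => []
  | [x] => [x]
  | x :: y :: rest =>
    if PySem.Chars.strip x == ['I'] &&
       PySem.Chars.startswith (PySem.Chars.lstrip y) ['t', 'e', 'm'] then
      ('I' :: PySem.Chars.lstrip y) :: goA rest
    else
      x :: goA (y :: rest)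

def merge_I_tem (content : String) : String :=
  String.ofList
    (PySem.Chars.join ['\n'] (goA ((PySem.Str.splitlines content).map String.toList)))

-- ===== PORT B =====
-- Source B's loop body: append the line, except overwrite out[-1] with the merged line
-- when the line lstrips to "tem…" and the last output line strips to "I".
def stepB (out : List (List Char)) (line : List Char) : List (List Char) :=
  let ls := PySem.Chars.lstrip line
  if PySem.Chars.startswith ls ['t', 'e', 'm'] && !out.isEmpty &&
     (PySem.Chars.strip (PySem.List.pyGetD out (-1) []) == ['I']) then
    PySem.List.pySetD out (-1) ('I' :: ls)
  else
    out ++ [line]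

def merge_I_tem_alt (content : String) : String :=
  String.ofList
    (PySem.Chars.join ['\n']
      (((PySem.Str.splitlines content).map String.toList).foldl stepB []))

-- ===== PRECONDITION & SPEC =====
def Spec_merge_I_tem (content : String) (out : String) : Prop := out = merge_I_tem_alt content
instance (content : String) (out : String) : Decidable (Spec_merge_I_tem content out) := by unfold Spec_merge_I_tem; infer_instance

-- ===== CLAIM (what is proved, stated in full; the proofs are below) =====
def Claim_equal_merge_I_tem : Prop := ∀ (content : String), Dom_merge_I_tem content → Spec_merge_I_tem content (merge_I_tem content)

-- ===== LEMMAS AND PROOFS =====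

-- the head of the remaining lines lstrips to "tem…"
def pvTemHead : List (List Char) → Bool
  | [] => false
  | y :: _ => PySem.Chars.startswith (PySem.Chars.lstrip y) ['t', 'e', 'm']

theorem pv_rstrip_ne_nil (l : List Char) (h : ∃ c ∈ l, PySem.Chars.isspace c = false) :
    PySem.Chars.rstrip l ≠ [] := by
  simp only [PySem.Chars.rstrip]
  intro hc
  rw [List.reverse_eq_nil_iff, List.dropWhile_eq_nil_iff] at hc
  obtain ⟨c, hm, hs⟩ := h
  exact absurd (hc c (by simpa using hm)) (by simp [hs])

theorem pv_rstrip_cons (a : Char) (l : List Char)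
    (h : ∃ c ∈ l, PySem.Chars.isspace c = false) :
    PySem.Chars.rstrip (a :: l) = a :: PySem.Chars.rstrip l := by
  simp only [PySem.Chars.rstrip]
  have hall : l.reverse.all PySem.Chars.isspace = false := by
    obtain ⟨c, hm, hs⟩ := h
    simp only [List.all_eq_false]
    exact ⟨c, by simpa using hm, by simp [hs]⟩
  have hne : (List.dropWhile PySem.Chars.isspace l.reverse) ≠ [] := by
    simp only [ne_eq, List.dropWhile_eq_nil_iff, not_forall]
    obtain ⟨c, hm, hs⟩ := h
    exact ⟨c, by simpa using hm, by simp [hs]⟩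
  have hrev : (a :: l).reverse = l.reverse ++ [a] := by simp
  rw [hrev, List.dropWhile_append, if_neg (by simp [hne])]
  simp

-- a merged line "I" + lstrip(y) with lstrip(y) starting "tem" never strips to "I"
theorem pv_merged_not_I (ls : List Char)
    (h : PySem.Chars.startswith ls ['t', 'e', 'm'] = true) :
    (PySem.Chars.strip ('I' :: ls) == ['I']) = false := by
  obtain ⟨r, rfl⟩ : ∃ r, ls = 't' :: 'e' :: 'm' :: r := by
    obtain ⟨t, ht⟩ := (PySem.Chars.startswith_iff ls ['t', 'e', 'm']).mp h
    exact ⟨t, ht.symm⟩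
  have hw : ∃ c ∈ 't' :: 'e' :: 'm' :: r, PySem.Chars.isspace c = false :=
    ⟨'t', by simp, by decide⟩
  have h1 : PySem.Chars.strip ('I' :: 't' :: 'e' :: 'm' :: r)
      = 'I' :: PySem.Chars.rstrip ('t' :: 'e' :: 'm' :: r) := by
    simp only [PySem.Chars.strip, PySem.Chars.lstrip]
    rw [List.dropWhile_cons_of_neg (by decide)]
    exact pv_rstrip_cons _ _ hw
  rw [h1]
  have h2 := pv_rstrip_ne_nil _ hw
  simp only [beq_eq_false_iff_ne, ne_eq, List.cons.injEq, not_and]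
  intro _; exact h2

-- a line is appended unchanged unless it is a tem-line following an "I" last output line
theorem pv_stepB_append (acc : List (List Char)) (x : List Char)
    (h : ∀ z, acc.getLast? = some z → (PySem.Chars.strip z == ['I']) = true →
        PySem.Chars.startswith (PySem.Chars.lstrip x) ['t', 'e', 'm'] = false) :
    stepB acc x = acc ++ [x] := by
  simp only [stepB]
  cases hacc : acc with
  | nil => simp
  | cons a as =>
    rw [← hacc]
    have hne : acc ≠ [] := by simp [hacc]
    by_cases htem : PySem.Chars.startswith (PySem.Chars.lstrip x) ['t', 'e', 'm'] = true
    · have hlast : PySem.List.pyGetD acc (-1) [] = acc.getLast hne :=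
        PySem.List.pyGetD_neg_one acc [] hne
      have hI : (PySem.Chars.strip (PySem.List.pyGetD acc (-1) []) == ['I']) = false := by
        rw [hlast]
        by_contra hc
        have := h (acc.getLast hne) (List.getLast?_eq_some_getLast hne) (by
          cases hb : (PySem.Chars.strip (acc.getLast hne) == ['I']) with
          | true => rfl
          | false => exact absurd hb hc)
        rw [this] at htem; exact Bool.false_ne_true htem
      rw [htem, hI]; simp
    · rw [Bool.not_eq_true] at htem
      rw [htem]; simp

-- merging step: after appending x (which strips to "I"), a tem-line y overwrites it
theorem pv_stepB_merge (acc : List (List Char)) (x y : List Char)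
    (hI : (PySem.Chars.strip x == ['I']) = true)
    (htem : PySem.Chars.startswith (PySem.Chars.lstrip y) ['t', 'e', 'm'] = true) :
    stepB (acc ++ [x]) y = acc ++ [('I' :: PySem.Chars.lstrip y)] := by
  simp only [stepB]
  rw [PySem.List.pyGetD_neg_one_append_singleton, htem, hI]
  simp only [Bool.and_true, Bool.true_and]
  have hne : ((acc ++ [x]).isEmpty) = false := by simp
  rw [hne]
  simp only [Bool.not_false, if_true]
  -- pySetD at -1 on acc ++ [x] replaces x
  simp [PySem.List.pySetD, PySem.List.pySet?, PySem.List.pyIdx?]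

-- main invariant: the fold equals acc ++ goA lines whenever no merge can fire at the seam
theorem pv_foldl_goA (lines : List (List Char)) :
    ∀ acc : List (List Char),
      (∀ z, acc.getLast? = some z → (PySem.Chars.strip z == ['I']) = true →
          pvTemHead lines = false) →
      lines.foldl stepB acc = acc ++ goA lines := by
  induction lines using goA.induct with
  | case1 => simp [goA]
  | case2 x =>
    intro acc h
    simp only [List.foldl_cons, List.foldl_nil, goA]
    rw [pv_stepB_append acc x (by
      intro z hz hI
      have := h z hz hI
      simpa [pvTemHead] using this)]
  | case3 x y rest hcond ih =>
    intro acc h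
    obtain ⟨hI, htem⟩ := Bool.and_eq_true_iff.mp hcond
    simp only [List.foldl_cons]
    rw [pv_stepB_append acc x (by
      intro z hz hzI
      have := h z hz hzI
      simpa [pvTemHead] using this)]
    rw [pv_stepB_merge acc x y hI htem]
    rw [ih (acc ++ [('I' :: PySem.Chars.lstrip y)]) (by
      intro z hz hzI
      rw [List.getLast?_concat] at hz
      simp at hz
      rw [← hz] at hzI
      rw [pv_merged_not_I _ htem] at hzI
      exact absurd hzI Bool.false_ne_true)]
    simp [goA, hcond]
  | case4 x y rest hcond ih =>
    intro acc h
    simp only [List.foldl_cons]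
    rw [pv_stepB_append acc x (by
      intro z hz hzI
      have := h z hz hzI
      simpa [pvTemHead] using this)]
    have := ih (acc ++ [x]) (by
      intro z hz hzI
      rw [List.getLast?_concat] at hz
      simp at hz
      subst hz
      simp only [pvTemHead]
      cases htem : PySem.Chars.startswith (PySem.Chars.lstrip y) ['t', 'e', 'm'] with
      | false => rfl
      | true => exact absurd (Bool.and_eq_true_iff.mpr ⟨hzI, htem⟩) hcond
    )
    simp only [List.foldl_cons] at this
    rw [this]
    simp [goA, hcond]

-- ===== VERDICT (by name: the statement is the Claim_ definition above) =====
theorem merge_I_tem_spec : Claim_equal_merge_I_tem := by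
  intro content _
  unfold Spec_merge_I_tem merge_I_tem merge_I_tem_alt
  rw [pv_foldl_goA _ [] (by intro z hz; simp at hz)]
  rfl
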